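-- pv_equiv track=rewrite | github.com/leruseadam/AGTDesigner2 | test_double_line_break_debug.py | break_after_2nd_space
-- ===== SOURCE A (Python) =====
-- def break_after_2nd_space(s):
--     parts = s.split(' ')
--     out = []
--     for i, part in enumerate(parts):
--         out.append(part)
--         if (i+1) % 2 == 0 and i != len(parts)-1:
--             out.append('\n')
--     result = ' '.join(out).replace(' \n ', '\n')
--     return result
-- ===== SOURCE B (Python) =====
-- def break_after_2nd_space(s):
--     words = s.split(' ')
--     lines = [' '.join(words[i:i + 2]) for i in range(0, len(words), 2)]
--     return '\n'.join(lines)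
-- ===== Notes on version B (the rewrite author's own statement) =====
-- stated objective: simpler
-- what changed: B chunks the split words into pairs with step-2 slicing and joins the pairs with newlines, removing A's per-word enumerate loop with conditional sentinel insertion and the replace(' \n ', '\n') cleanup pass.
-- intended difference: On inputs where some space-separated word at an odd, non-last index is exactly a lone newline character, A's cleanup pass (which rewrites every space-newline-space run into a bare newline) also collapses the spaces around that pre-existing newline word, while B returns the plain pair-chunked text, which is the intended value since the cleanup was only meant for A's own inserted sentinels. — e.g. on break_after_2nd_space(" \n "): A returns "\n\n ", B returns " \n\n"
import Mathlib
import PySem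

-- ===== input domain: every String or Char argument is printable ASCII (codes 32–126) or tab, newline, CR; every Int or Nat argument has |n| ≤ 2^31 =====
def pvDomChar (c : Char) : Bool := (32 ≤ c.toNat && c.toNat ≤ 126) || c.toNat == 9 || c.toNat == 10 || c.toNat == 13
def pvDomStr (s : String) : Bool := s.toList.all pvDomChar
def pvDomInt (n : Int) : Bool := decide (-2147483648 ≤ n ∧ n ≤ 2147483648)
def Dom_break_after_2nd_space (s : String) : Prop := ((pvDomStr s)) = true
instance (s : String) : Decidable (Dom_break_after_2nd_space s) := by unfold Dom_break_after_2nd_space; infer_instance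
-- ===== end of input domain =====

-- B replaces A's enumerate loop + sentinel insertion + replace(' \n ', '\n') cleanup by
-- chunking the split words into pairs and joining the pairs with '\n' (simpler decomposition).


-- ===== PORT A =====
def break_after_2nd_space (s : String) : String :=
  let parts := (PySem.Str.split? s " ").getD []
  let out := (PySem.List.enumerate parts).foldl
    (fun out ip =>
      let out := out ++ [ip.2]
      if PySem.Int.mod (ip.1 + 1) 2 == 0 && ip.1 != (parts.length : Int) - 1 then
        out ++ ["\n"]
      else out) []
  PySem.Str.replace (PySem.Str.join " " out) " \n " "\n"

-- ===== PORT B =====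
def break_after_2nd_space_alt (s : String) : String :=
  let words := (PySem.Str.split? s " ").getD []
  let lines := (PySem.List.pyRange 0 (words.length : Int) 2).map
    (fun i => PySem.Str.join " " (PySem.List.slice words (some i) (some (i + 2))))
  PySem.Str.join "\n" lines

-- ===== PRECONDITION & SPEC =====
-- helper for D_: does the list of space-separated chunks of the input have, at an odd,
-- non-last position, a chunk that is exactly a lone newline character?
def pvHasBadChunk : List (List Char) → Bool
  | _ :: b :: c :: t => b == ['\n'] || pvHasBadChunk (c :: t)
  | _ => false

-- On inputs where some space-separated word at an odd non-last index is exactly "\n",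
-- A's replace(' \n ', '\n') cleanup also collapses the spaces around that pre-existing
-- newline word, while B returns the plain pair-chunked text, the intended value (the
-- cleanup was only meant for A's own inserted sentinels).
def D_break_after_2nd_space (s : String) : Prop :=
  pvHasBadChunk (PySem.Chars.splitOn s.toList [' ']) = true
instance (s : String) : Decidable (D_break_after_2nd_space s) := by
  unfold D_break_after_2nd_space; infer_instance

def Spec_break_after_2nd_space (s : String) (out : String) : Prop :=
  ¬ D_break_after_2nd_space s → out = break_after_2nd_space_alt s
instance (s : String) (out : String) : Decidable (Spec_break_after_2nd_space s out) := by
  unfold Spec_break_after_2nd_space; infer_instance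

def pvDiffWitness_break_after_2nd_space : String := " \n "
def pvDiffWitnessOut_break_after_2nd_space : String × String := ("\n\n ", " \n\n")

-- ===== CLAIM (what is proved, stated in full; the proofs are below) =====
def Claim_unchanged_break_after_2nd_space : Prop := ∀ (s : String), Dom_break_after_2nd_space s → Spec_break_after_2nd_space s (break_after_2nd_space s)
def Claim_changed_break_after_2nd_space : Prop := Dom_break_after_2nd_space (pvDiffWitness_break_after_2nd_space) ∧ D_break_after_2nd_space (pvDiffWitness_break_after_2nd_space) ∧ break_after_2nd_space (pvDiffWitness_break_after_2nd_space) = pvDiffWitnessOut_break_after_2nd_space.1 ∧ break_after_2nd_space_alt (pvDiffWitness_break_after_2nd_space) = pvDiffWitnessOut_break_after_2nd_space.2 ∧ pvDiffWitnessOut_break_after_2nd_space.1 ≠ pvDiffWitnessOut_break_after_2nd_space.2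

-- ===== LEMMAS AND PROOFS =====

-- repAll is str.replace(' \n ', '\n') written as one left-to-right scan.
def repAll : List Char → List Char
  | [] => []
  | c :: t =>
    if [' ', '\n', ' '].isPrefixOf (c :: t) then '\n' :: repAll (t.drop 2)
    else c :: repAll t
termination_by l => l.length
decreasing_by
  all_goals simp [List.length_drop]

-- A's joined-with-sentinels string, two words at a time.
def hpair : List (List Char) → List Char
  | [] => []
  | [a] => a
  | [a, b] => a ++ ' ' :: b
  | a :: b :: c :: t => a ++ ' ' :: b ++ ' ' :: '\n' :: ' ' :: hpair (c :: t)

-- B's pair-chunked string, two words at a time.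
def gpair : List (List Char) → List Char
  | [] => []
  | [a] => a
  | [a, b] => a ++ ' ' :: b
  | a :: b :: c :: t => a ++ ' ' :: b ++ '\n' :: gpair (c :: t)

-- induction two list elements at a time (the shape of hpair/gpair/pvHasBadWord)
theorem pairInd {α : Type} (motive : List α → Prop) (h0 : motive [])
    (h1 : ∀ a, motive [a]) (h2 : ∀ a b, motive [a, b])
    (h3 : ∀ a b c t, motive (c :: t) → motive (a :: b :: c :: t)) : ∀ l, motive l
  | [] => h0
  | [a] => h1 a
  | [a, b] => h2 a b
  | a :: b :: c :: t => h3 a b c t (pairInd motive h0 h1 h2 h3 (c :: t))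

theorem repAll_pat (z : List Char) : repAll (' ' :: '\n' :: ' ' :: z) = '\n' :: repAll z := by
  rw [repAll]
  simp [List.isPrefixOf]

theorem repAll_cons_neg (c : Char) (t : List Char)
    (h : ¬ [' ', '\n', ' '].isPrefixOf (c :: t) = true) :
    repAll (c :: t) = c :: repAll t := by
  rw [repAll, if_neg h]

theorem replace_go_eq (fuel : Nat) : ∀ (l acc : List Char), l.length ≤ fuel →
    PySem.Chars.replace.go [' ', '\n', ' '] ['\n'] fuel l acc = acc.reverse ++ repAll l := by
  induction fuel with
  | zero =>
    intro l acc h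
    have hl : l = [] := by cases l <;> simp_all
    subst hl
    show List.reverse acc ++ [] = acc.reverse ++ repAll []
    simp [repAll]
  | succ fuel ih =>
    intro l acc h
    cases l with
    | nil =>
      show List.reverse acc = acc.reverse ++ repAll []
      simp [repAll]
    | cons c t =>
      show (if ([' ', '\n', ' '] : List Char).isPrefixOf (c :: t) = true then
            PySem.Chars.replace.go [' ', '\n', ' '] ['\n'] fuel
              (List.drop ([' ', '\n', ' '] : List Char).length (c :: t))
              (List.reverse ['\n'] ++ acc)
          else PySem.Chars.replace.go [' ', '\n', ' '] ['\n'] fuel t (c :: acc))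
          = acc.reverse ++ repAll (c :: t)
      by_cases hp : ([' ', '\n', ' '] : List Char).isPrefixOf (c :: t) = true
      · rw [if_pos hp]
        obtain ⟨u, hu⟩ := List.isPrefixOf_iff_prefix.mp hp
        rw [← hu]
        have hlen : u.length ≤ fuel := by
          have := congrArg List.length hu
          simp at this h
          omega
        rw [show List.drop ([' ', '\n', ' '] : List Char).length
              (([' ', '\n', ' '] : List Char) ++ u) = u from by simp]
        rw [ih u _ hlen]
        rw [show (([' ', '\n', ' '] : List Char) ++ u) = ' ' :: '\n' :: ' ' :: u from rfl,
          repAll_pat]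
        simp
      · rw [if_neg hp]
        rw [ih t _ (by simp at h ⊢; omega)]
        rw [repAll_cons_neg c t hp]
        simp

theorem replace_eq_repAll (l : List Char) :
    PySem.Chars.replace l [' ', '\n', ' '] ['\n'] = repAll l := by
  rw [PySem.Chars.replace]
  simp only [List.isEmpty_cons, Bool.false_eq_true, if_false]
  exact replace_go_eq l.length l [] (le_refl _)

theorem repAll_append (x y : List Char) (hx : ' ' ∉ x) :
    repAll (x ++ y) = x ++ repAll y := by
  induction x with
  | nil => simp
  | cons c x ih =>
    have hc : ¬ (' ' = c) := by rintro rfl; exact hx List.mem_cons_self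
    have hx' : ' ' ∉ x := fun h => hx (List.mem_cons_of_mem _ h)
    have hnp : ¬ ([' ', '\n', ' '] : List Char).isPrefixOf (c :: (x ++ y)) = true := by
      simp [List.isPrefixOf, hc]
    rw [List.cons_append, repAll_cons_neg c _ hnp, ih hx']
    simp

theorem repAll_nospace (x : List Char) (hx : ' ' ∉ x) : repAll x = x := by
  have := repAll_append x [] hx
  simpa [repAll] using this

theorem splitOn_go_nospace (fuel : Nat) : ∀ (l cur : List Char) (acc : List (List Char)),
    l.length < fuel → ' ' ∉ cur → (∀ p ∈ acc, ' ' ∉ p) →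
    ∀ p ∈ PySem.Chars.splitOn.go [' '] fuel l cur acc, ' ' ∉ p := by
  induction fuel with
  | zero => intro l cur acc h; omega
  | succ fuel ih =>
    intro l cur acc h hcur hacc
    cases l with
    | nil =>
      show ∀ p ∈ (List.reverse cur :: acc).reverse, ' ' ∉ p
      intro p hp
      simp at hp
      rcases hp with hp | hp
      · exact hacc p hp
      · subst hp; simpa using hcur
    | cons c t =>
      show ∀ p ∈ (if ([' '] : List Char).isPrefixOf (c :: t) = true then
            PySem.Chars.splitOn.go [' '] fuel (List.drop ([' '] : List Char).length (c :: t)) []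
              (cur.reverse :: acc)
          else PySem.Chars.splitOn.go [' '] fuel t (c :: cur) acc), ' ' ∉ p
      by_cases hp : ([' '] : List Char).isPrefixOf (c :: t) = true
      · rw [if_pos hp]
        apply ih
        · simp at h ⊢; omega
        · simp
        · intro p hpm
          rcases List.mem_cons.mp hpm with hpm | hpm
          · subst hpm; simpa using hcur
          · exact hacc p hpm
      · rw [if_neg hp]
        have hc : ¬ (' ' = c) := by simpa [List.isPrefixOf] using hp
        apply ih
        · simp at h ⊢; omega
        · intro hm
          rcases List.mem_cons.mp hm with hm | hm
          · exact hc hm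
          · exact hcur hm
        · exact hacc

theorem splitOn_nospace (cs : List Char) :
    ∀ p ∈ PySem.Chars.splitOn cs [' '], ' ' ∉ p := by
  rw [PySem.Chars.splitOn]
  exact splitOn_go_nospace (cs.length + 1) cs [] [] (by omega) (by simp) (by simp)

-- the fold of A's loop is a flatMap
theorem out_eq_flatMap (parts : List String) :
    (PySem.List.enumerate parts).foldl
      (fun out ip =>
        let out := out ++ [ip.2]
        if PySem.Int.mod (ip.1 + 1) 2 == 0 && ip.1 != (parts.length : Int) - 1 then
          out ++ ["\n"]
        else out) []
    = (PySem.List.enumerate parts).flatMap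
        (fun ip => if PySem.Int.mod (ip.1 + 1) 2 == 0 && ip.1 != (parts.length : Int) - 1
                   then [ip.2, "\n"] else [ip.2]) := by
  have hf : (fun (out : List String) (ip : Int × String) =>
        let out := out ++ [ip.2]
        if PySem.Int.mod (ip.1 + 1) 2 == 0 && ip.1 != (parts.length : Int) - 1 then
          out ++ ["\n"]
        else out)
      = fun out ip => out ++
          (if PySem.Int.mod (ip.1 + 1) 2 == 0 && ip.1 != (parts.length : Int) - 1
           then [ip.2, "\n"] else [ip.2]) := by
    funext out ip
    by_cases hc : (PySem.Int.mod (ip.1 + 1) 2 == 0 && ip.1 != (parts.length : Int) - 1) = true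
    · simp only [hc, if_true]
      simp
    · simp only [Bool.not_eq_true] at hc
      simp only [hc, Bool.false_eq_true, if_false]
  rw [hf, PySem.List.foldl_append_eq_flatMap]
  simp

-- A's join over the flatMap, in pair form
theorem joinA_eq_hpair (l : List String) : ∀ (m : Nat) (N : Int), N = 2 * m + l.length →
    PySem.Chars.join [' ']
      (((PySem.List.enumerate l (2 * (m : Int))).flatMap
          (fun ip => if PySem.Int.mod (ip.1 + 1) 2 == 0 && ip.1 != N - 1
                     then [ip.2, "\n"] else [ip.2])).map String.toList)
    = hpair (l.map String.toList) := by
  induction l using pairInd with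
  | h0 =>
    intro m N hN
    simp [PySem.List.enumerate_nil, PySem.Chars.join, List.intercalate, hpair]
  | h1 a =>
    intro m N hN
    have h1 : PySem.Int.mod (2 * (m : Int) + 1) 2 = 1 := by
      rw [PySem.Int.mod_eq_emod_of_pos (by omega)]; omega
    rw [PySem.List.enumerate_cons, PySem.List.enumerate_nil]
    simp only [List.flatMap_cons, List.flatMap_nil]
    rw [if_neg (by simp only [h1]; simp)]
    simp only [List.append_nil, List.map_cons, List.map_nil]
    rw [PySem.Chars.join_singleton]
    simp [hpair]
  | h2 a b =>
    intro m N hN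
    have hN' : N = 2 * (m : Int) + 2 := by simp at hN; omega
    have h1 : PySem.Int.mod (2 * (m : Int) + 1) 2 = 1 := by
      rw [PySem.Int.mod_eq_emod_of_pos (by omega)]; omega
    have h2 : PySem.Int.mod (2 * (m : Int) + 1 + 1) 2 = 0 := by
      rw [PySem.Int.mod_eq_emod_of_pos (by omega)]; omega
    rw [PySem.List.enumerate_cons, PySem.List.enumerate_cons, PySem.List.enumerate_nil]
    simp only [List.flatMap_cons, List.flatMap_nil]
    rw [if_neg (by simp only [h1]; simp), if_neg (by simp only [h2]; simp; omega)]
    simp only [List.append_nil, List.cons_append, List.nil_append, List.map_cons, List.map_nil]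
    rw [PySem.Chars.join_cons_cons, PySem.Chars.join_singleton]
    simp [hpair]
  | h3 a b c t ih =>
    intro m N hN
    have hN' : N = 2 * (m : Int) + 3 + t.length := by simp at hN; omega
    have h1 : PySem.Int.mod (2 * (m : Int) + 1) 2 = 1 := by
      rw [PySem.Int.mod_eq_emod_of_pos (by omega)]; omega
    have h2 : PySem.Int.mod (2 * (m : Int) + 1 + 1) 2 = 0 := by
      rw [PySem.Int.mod_eq_emod_of_pos (by omega)]; omega
    have hrec := ih (m + 1) N (by simp at hN ⊢; omega)
    push_cast at hrec
    rw [show (2 * ((m : Int) + 1)) = 2 * (m : Int) + 1 + 1 from by ring] at hrec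
    rw [PySem.List.enumerate_cons, PySem.List.enumerate_cons]
    simp only [List.flatMap_cons]
    rw [if_neg (by simp only [h1]; simp), if_pos (by simp only [h2]; simp; omega)]
    obtain ⟨q, qs, hq⟩ : ∃ q qs,
        ((PySem.List.enumerate (c :: t) (2 * (m : Int) + 1 + 1)).flatMap
          (fun ip => if PySem.Int.mod (ip.1 + 1) 2 == 0 && ip.1 != N - 1
                     then [ip.2, "\n"] else [ip.2])) = q :: qs := by
      rw [PySem.List.enumerate_cons]
      simp only [List.flatMap_cons]
      split
      · exact ⟨c, _, rfl⟩
      · exact ⟨c, _, rfl⟩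
    rw [hq]
    simp only [List.cons_append, List.nil_append, List.map_cons]
    rw [show ("\n" : String).toList = ['\n'] from rfl]
    rw [PySem.Chars.join_cons_cons, PySem.Chars.join_cons_cons, PySem.Chars.join_cons_cons]
    rw [show (q.toList :: List.map String.toList qs)
        = List.map String.toList (q :: qs) from rfl, ← hq, hrec]
    simp [hpair]

theorem pyRange_two_cons (a b : Int) (h : a < b) :
    PySem.List.pyRange a b 2 = a :: PySem.List.pyRange (a + 2) b 2 := by
  rw [PySem.List.pyRange_of_pos _ _ (by omega : (0:Int) < 2),
    PySem.List.pyRange_of_pos _ _ (by omega : (0:Int) < 2)]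
  by_cases h2 : a + 2 < b
  · have hn : ((b - a + 2 - 1) / 2).toNat = ((b - (a + 2) + 2 - 1) / 2).toNat + 1 := by omega
    rw [if_pos h, if_pos h2, hn, List.range_succ_eq_map]
    simp only [List.map_cons, List.map_map]
    congr 1
    · norm_num
    · apply List.map_congr_left
      intro x hx
      simp only [Function.comp_apply]
      push_cast
      ring
  · have hn : ((b - a + 2 - 1) / 2).toNat = 1 := by omega
    rw [if_pos h, if_neg h2, hn]
    simp

theorem pyRange_two_nil (a b : Int) (h : b ≤ a) :
    PySem.List.pyRange a b 2 = [] := by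
  rw [PySem.List.pyRange_of_pos _ _ (by omega : (0:Int) < 2), if_neg (by omega)]
  simp

-- B's join over the step-2 range, in pair form
theorem joinB_eq_gpair (words : List String) : ∀ (d k : Nat), words.length - k ≤ d →
    PySem.Chars.join ['\n']
      (((PySem.List.pyRange (k : Int) (words.length : Int) 2).map
          (fun i => PySem.Str.join " " (PySem.List.slice words (some i) (some (i + 2))))).map
        String.toList)
    = gpair ((words.drop k).map String.toList) := by
  have hbase : ∀ (k : Nat), words.length ≤ k →
      PySem.Chars.join ['\n']
        (((PySem.List.pyRange (k : Int) (words.length : Int) 2).map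
            (fun i => PySem.Str.join " " (PySem.List.slice words (some i) (some (i + 2))))).map
          String.toList)
      = gpair ((words.drop k).map String.toList) := by
    intro k hk
    rw [pyRange_two_nil _ _ (by exact_mod_cast hk)]
    simp [PySem.Chars.join, List.intercalate, List.drop_eq_nil_of_le hk, gpair]
  intro d
  induction d with
  | zero =>
    intro k hk
    exact hbase k (by omega)
  | succ d ih =>
    intro k hk
    by_cases hlt : k < words.length
    · rw [pyRange_two_cons _ _ (by exact_mod_cast hlt)]
      have hsl : PySem.List.slice words (some (k : Int)) (some ((k : Int) + 2))
          = (words.drop k).take 2 := by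
        have h := PySem.List.slice_natCast_add words k 2
        push_cast at h
        exact h
      have hd1 : words.drop k = words[k] :: words.drop (k + 1) :=
        List.drop_eq_getElem_cons hlt
      by_cases h2 : k + 2 < words.length
      · -- another full pair follows
        have hd2 : words.drop (k + 1) = words[k + 1] :: words.drop (k + 2) :=
          List.drop_eq_getElem_cons (by omega)
        have ihr := ih (k + 2) (by omega)
        push_cast at ihr
        obtain ⟨q, qs, hq⟩ : ∃ q qs,
            ((PySem.List.pyRange ((k : Int) + 2) (words.length : Int) 2).map
              (fun i => PySem.Str.join " " (PySem.List.slice words (some i) (some (i + 2))))).map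
              String.toList = q :: qs := by
          rw [pyRange_two_cons _ _ (by exact_mod_cast h2)]
          exact ⟨_, _, rfl⟩
        rw [List.map_cons, List.map_cons, hq, PySem.Chars.join_cons_cons, ← hq, ihr]
        rw [hsl, hd1, hd2]
        simp only [List.take_succ_cons, List.take_zero]
        rw [PySem.Str.toList_join]
        rw [show (" " : String).toList = [' '] from rfl]
        simp only [List.map_cons, List.map_nil]
        rw [PySem.Chars.join_cons_cons, PySem.Chars.join_singleton]
        have hd3 : words.drop (k + 2) = words[k + 2] :: words.drop (k + 3) :=
          List.drop_eq_getElem_cons (by omega)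
        rw [hd3, List.map_cons]
        simp only [gpair]
        simp
      · -- this is the last line
        have hemp : PySem.List.pyRange ((k : Int) + 2) (words.length : Int) 2 = [] := by
          apply pyRange_two_nil
          have : words.length ≤ k + 2 := by omega
          exact_mod_cast this
        rw [hemp]
        simp only [List.map_cons, List.map_nil]
        rw [PySem.Chars.join_singleton, hsl, hd1]
        rw [PySem.Str.toList_join]
        rw [show (" " : String).toList = [' '] from rfl]
        by_cases hk1 : k + 1 < words.length
        · have hd2 : words.drop (k + 1) = words[k + 1] :: words.drop (k + 2) :=
            List.drop_eq_getElem_cons (by omega)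
          have hd2' : words.drop (k + 2) = [] := List.drop_eq_nil_of_le (by omega)
          rw [hd2, hd2']
          simp only [List.take_succ_cons, List.take_zero, List.map_cons, List.map_nil]
          rw [PySem.Chars.join_cons_cons, PySem.Chars.join_singleton]
          simp [gpair]
        · have hd2 : words.drop (k + 1) = [] := List.drop_eq_nil_of_le (by omega)
          rw [hd2]
          simp only [List.take_succ_cons, List.take_nil, List.map_cons, List.map_nil]
          rw [PySem.Chars.join_singleton]
          simp [gpair]
    · exact hbase k (by omega)

-- the String-level view of pvHasBadChunk, used by the induction below
def pvHasBadWord : List String → Bool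
  | _ :: b :: c :: t => b == "\n" || pvHasBadWord (c :: t)
  | _ => false

theorem hasBadChunk_map (l : List String) :
    pvHasBadChunk (l.map String.toList) = pvHasBadWord l := by
  induction l using pairInd with
  | h0 => rfl
  | h1 a => rfl
  | h2 a b => rfl
  | h3 a b c t ih =>
    simp only [List.map_cons, pvHasBadChunk, pvHasBadWord]
    rw [show c.toList :: List.map String.toList t = List.map String.toList (c :: t) from rfl, ih]
    congr 1
    by_cases hb : b = "\n"
    · simp [hb]
    · have hbl : b.toList ≠ ['\n'] := fun h => hb (String.ext (by rw [h]; rfl))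
      simp [hb, hbl]

theorem not_pat_prefix_pair (b : List Char) (hb : ' ' ∉ b) :
    ¬ ([' ', '\n', ' '] : List Char).isPrefixOf (' ' :: b) = true := by
  intro h
  cases b with
  | nil => simp [List.isPrefixOf] at h
  | cons d b' =>
    cases b' with
    | nil => simp [List.isPrefixOf] at h
    | cons e b'' =>
      simp [List.isPrefixOf] at h
      apply hb
      rw [h.2]
      exact List.mem_cons_of_mem _ List.mem_cons_self

theorem not_pat_prefix_mid (b z : List Char) (hb : ' ' ∉ b) (hbne : b ≠ ['\n']) :
    ¬ ([' ', '\n', ' '] : List Char).isPrefixOf (' ' :: (b ++ ' ' :: '\n' :: ' ' :: z)) = true := by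
  intro h
  cases b with
  | nil => simp [List.isPrefixOf] at h
  | cons d b' =>
    cases b' with
    | nil =>
      simp [List.isPrefixOf] at h
      exact hbne (by rw [← h])
    | cons e b'' =>
      simp [List.isPrefixOf] at h
      apply hb
      rw [h.2]
      exact List.mem_cons_of_mem _ List.mem_cons_self

theorem repAll_hpair (l : List String) (hs : ∀ p ∈ l, ' ' ∉ p.toList)
    (hb : pvHasBadWord l = false) :
    repAll (hpair (l.map String.toList)) = gpair (l.map String.toList) := by
  induction l using pairInd with
  | h0 => simp [hpair, gpair, repAll]
  | h1 a => simp only [List.map_cons, List.map_nil, hpair, gpair]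
            exact repAll_nospace _ (hs a (by simp))
  | h2 a b =>
    have ha := hs a (by simp)
    have hbsp := hs b (by simp)
    simp only [List.map_cons, List.map_nil, hpair, gpair]
    rw [show a.toList ++ ' ' :: b.toList = a.toList ++ (' ' :: b.toList) from rfl]
    rw [repAll_append _ _ ha]
    rw [repAll_cons_neg _ _ (not_pat_prefix_pair _ hbsp)]
    rw [repAll_nospace _ hbsp]
  | h3 a b c t ih =>
    have ha := hs a (by simp)
    have hbsp := hs b (by simp)
    have hs' : ∀ p ∈ c :: t, ' ' ∉ p.toList := by
      intro p hp
      apply hs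
      simp at hp ⊢
      tauto
    have hb' : (b == "\n") = false ∧ pvHasBadWord (c :: t) = false := by
      rw [pvHasBadWord] at hb
      simpa using hb
    have hbne : b.toList ≠ ['\n'] := by
      intro h
      have hb2 : b = "\n" := String.ext (by rw [h]; rfl)
      rw [hb2] at hb'
      simp at hb'
    have ihr := ih hs' hb'.2
    rw [List.map_cons] at ihr
    simp only [List.map_cons, hpair, gpair]
    rw [show a.toList ++ ' ' :: b.toList ++ ' ' :: '\n' :: ' ' ::
          hpair (c.toList :: List.map String.toList t)
        = a.toList ++ (' ' :: (b.toList ++ ' ' :: '\n' :: ' ' ::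
          hpair (c.toList :: List.map String.toList t))) from by simp]
    rw [repAll_append _ _ ha]
    rw [repAll_cons_neg _ _ (not_pat_prefix_mid _ _ hbsp hbne)]
    rw [repAll_append _ _ hbsp]
    rw [repAll_pat]
    rw [ihr]
    simp

-- ===== VERDICT (by name: the statement is the Claim_ definition above) =====
theorem break_after_2nd_space_spec : Claim_unchanged_break_after_2nd_space := by
  intro s _ hnD
  apply String.ext
  -- bridge the split to the char level
  obtain ⟨L, hL, hmap⟩ : ∃ L, PySem.Str.split? s " " = some L ∧
      L.map String.toList = PySem.Chars.splitOn s.toList [' '] := by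
    have h := PySem.Str.split?_map s " "
    rw [show (" " : String).toList = [' '] from rfl] at h
    cases hsp : PySem.Str.split? s " " with
    | none => rw [hsp] at h; simp [PySem.Chars.split?] at h
    | some L =>
      rw [hsp] at h
      simp [PySem.Chars.split?] at h
      exact ⟨L, rfl, h⟩
  have hgetD : (PySem.Str.split? s " ").getD [] = L := by rw [hL]; rfl
  have hs : ∀ p ∈ L, ' ' ∉ p.toList := by
    intro p hp
    apply splitOn_nospace s.toList
    rw [← hmap]
    exact List.mem_map_of_mem hp
  have hbw : pvHasBadWord L = false := by
    unfold D_break_after_2nd_space at hnD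
    rw [← hmap, hasBadChunk_map] at hnD
    simpa using hnD
  -- A's side
  rw [break_after_2nd_space]
  simp only [hgetD]
  rw [PySem.Str.toList_replace, PySem.Str.toList_join]
  rw [show (" \n " : String).toList = [' ', '\n', ' '] from rfl]
  rw [show ("\n" : String).toList = ['\n'] from rfl]
  rw [show (" " : String).toList = [' '] from rfl]
  rw [out_eq_flatMap]
  rw [replace_eq_repAll]
  have hA := joinA_eq_hpair L 0 (L.length : Int) (by simp)
  rw [show (2 * ((0 : Nat) : Int)) = 0 from by norm_num] at hA
  rw [hA, repAll_hpair L hs hbw]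
  -- B's side
  rw [break_after_2nd_space_alt]
  simp only [hgetD]
  rw [PySem.Str.toList_join]
  rw [show ("\n" : String).toList = ['\n'] from rfl]
  have hB := joinB_eq_gpair L L.length 0 (by omega)
  rw [show ((0 : Nat) : Int) = 0 from rfl] at hB
  rw [hB]
  simp

theorem break_after_2nd_space_changed : Claim_changed_break_after_2nd_space := by
  unfold Claim_changed_break_after_2nd_space; decide
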